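-- pv_equiv track=rewrite | github.com/loongx2/python_code_exp | python_examples/recurringscharlist.py | insert_repeat_counts_dict
-- ===== SOURCE A (Python) =====
-- def insert_repeat_counts_dict(s):
--     """
--     Insert numerical counts using dictionary approach - shows unique characters with total frequency (only if > 1).
--     Example: "aaabbc" -> "a3b2c" (each character appears once with its total count, singles excluded)
--     """
--     if not s:
--         return s
--
--     # Count frequency of each character while preserving first occurrence order
--     char_count = {}
--     order = []
--     for char in s:
--         if char not in char_count:
--             order.append(char)
--             char_count[char] = 0
--         char_count[char] += 1
--
--     # Build result string - each unique character with its total count (only if > 1)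
--     result = []
--     for char in order:
--         result.append(char)
--         if char_count[char] > 1:
--             result.append(str(char_count[char]))
--
--     return ''.join(result)
-- ===== SOURCE B (Python) =====
-- def insert_repeat_counts_dict(s):
--     """
--     Strip-and-recurse: emit the first character with its total count (if > 1),
--     remove all its occurrences, and recurse on what remains. No dict, no tally pass.
--     """
--     if not s:
--         return s
--
--     def go(chars):
--         if not chars:
--             return ''
--         c = chars[0]
--         n = chars.count(c)
--         rest = [x for x in chars if x != c]
--         return c + (str(n) if n > 1 else '') + go(rest)
--
--     return go(list(s))
-- ===== Notes on version B (the rewrite author's own statement) =====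
-- stated objective: alternative
-- what changed: Replaces A's single-pass dict tally plus order list with a strip-and-recurse scheme: emit the head character with its total count, filter out all its occurrences, and recurse on the remainder; no dictionary or order list is maintained.
import Mathlib
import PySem

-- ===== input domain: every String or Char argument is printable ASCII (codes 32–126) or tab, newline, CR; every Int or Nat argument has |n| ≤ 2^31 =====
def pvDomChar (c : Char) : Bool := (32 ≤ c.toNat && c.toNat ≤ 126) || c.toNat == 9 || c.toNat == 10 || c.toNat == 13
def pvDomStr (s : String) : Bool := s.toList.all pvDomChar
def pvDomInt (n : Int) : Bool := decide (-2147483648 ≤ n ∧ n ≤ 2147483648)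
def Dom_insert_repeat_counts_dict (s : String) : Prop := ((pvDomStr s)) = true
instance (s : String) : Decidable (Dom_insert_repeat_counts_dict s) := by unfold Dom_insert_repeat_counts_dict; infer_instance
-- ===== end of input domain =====

-- B replaces A's one-pass dict tally (count map + order list) with strip-and-recurse:
-- emit the head with its total count, filter out all its occurrences, recurse; alternative, not faster.

-- ===== PORT A =====
-- one iteration of A's counting loop: 'if char not in char_count: order.append(char); char_count[char] = 0' then 'char_count[char] += 1'
def pvAStep (st : PySem.Dict Char Int × List Char) (c : Char) : PySem.Dict Char Int × List Char :=
  let st := if st.1.contains c then st else (st.1.insert c 0, st.2 ++ [c])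
  -- 'char_count[char] += 1': the key is always present at this point, so getD is exact
  (st.1.insert c (st.1.getD c 0 + 1), st.2)

def insert_repeat_counts_dict (s : String) : String :=
  if s.toList = [] then s                       -- 'if not s: return s'
  else
    let st := s.toList.foldl pvAStep (PySem.Dict.empty, [])
    let result := st.2.foldl (fun (r : List (List Char)) c =>
      let r := r ++ [[c]]
      if st.1.getD c 0 > 1 then r ++ [PySem.Int.toChars (st.1.getD c 0)] else r) []
    String.mk result.flatten                    -- ''.join(result)

-- ===== PORT B =====
-- 'def go(chars): …' — head char, its count in the remaining list, filter it out, recurse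
def pvGo : List Char → List Char
  | [] => []                                    -- 'if not chars: return '''
  | a :: t =>
    let n := (a :: t).count a                   -- 'n = chars.count(c)' (element count in a char list)
    let rest := (a :: t).filter (fun x => x ≠ a)        -- 'rest = [x for x in chars if x != c]'
    (a :: (if n > 1 then PySem.Int.toChars (n : Int) else [])) ++ pvGo rest
                                                -- 'c + (str(n) if n > 1 else '') + go(rest)'
  termination_by l => l.length
  decreasing_by
    have h1 : ((a :: t).filter (fun x => x ≠ a)).length ≤ t.length := by
      simp only [List.filter_cons]
      rw [if_neg (by simp)]
      exact List.length_filter_le _ t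
    simp only [List.length_cons]; omega

def insert_repeat_counts_dict_alt (s : String) : String :=
  if s.toList = [] then s                       -- 'if not s: return s'
  else String.mk (pvGo s.toList)                -- 'return go(list(s))'

-- ===== PRECONDITION & SPEC =====
def Spec_insert_repeat_counts_dict (s : String) (out : String) : Prop := out = insert_repeat_counts_dict_alt s
instance (s : String) (out : String) : Decidable (Spec_insert_repeat_counts_dict s out) := by unfold Spec_insert_repeat_counts_dict; infer_instance

-- ===== CLAIM (what is proved, stated in full; the proofs are below) =====
def Claim_equal_insert_repeat_counts_dict : Prop := ∀ (s : String), Dom_insert_repeat_counts_dict s → Spec_insert_repeat_counts_dict s (insert_repeat_counts_dict s)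

-- ===== LEMMAS AND PROOFS =====

-- invariant of A's counting loop: the order list accumulates first occurrences, the dict the counts
theorem pvAFold (l : List Char) : ∀ (d : PySem.Dict Char Int) (ord : List Char),
    (∀ x, d.contains x = true ↔ x ∈ ord) →
    (l.foldl pvAStep (d, ord)).2 = PySem.Set.update ord l ∧
    ∀ c, (l.foldl pvAStep (d, ord)).1.getD c 0 = d.getD c 0 + l.count c := by
  induction l with
  | nil => intro d ord h; simp [PySem.Set.update]
  | cons a t ih =>
    intro d ord h
    rw [List.foldl_cons]
    by_cases ha : d.contains a = true
    · have hstep : pvAStep (d, ord) a = (d.insert a (d.getD a 0 + 1), ord) := by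
        simp [pvAStep, ha]
      rw [hstep]
      have hmem : a ∈ ord := (h a).mp ha
      have h' : ∀ x, (d.insert a (d.getD a 0 + 1)).contains x = true ↔ x ∈ ord := by
        intro x
        rw [PySem.Dict.contains_insert]
        by_cases hx : x = a
        · simp [hx, hmem]
        · simp [h x, beq_eq_false_iff_ne.mpr hx]
      obtain ⟨h1, h2⟩ := ih (d.insert a (d.getD a 0 + 1)) ord h'
      refine ⟨?_, ?_⟩
      · rw [h1, PySem.Set.update_cons, PySem.Set.add_of_mem hmem]
      · intro c
        rw [h2 c, PySem.Dict.getD_insert, List.count_cons]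
        by_cases hc : c = a
        · subst hc; simp; ring
        · have hba : (a == c) = false := beq_eq_false_iff_ne.mpr (fun h'' => hc h''.symm)
          simp [hc, hba]
    · have hstep : pvAStep (d, ord) a = (d.insert a 1, ord ++ [a]) := by
        simp [pvAStep, ha, PySem.Dict.getD_insert_self, PySem.Dict.insert_insert_self]
      rw [hstep]
      have hnmem : a ∉ ord := fun hm => by simp [(h a).mpr hm] at ha
      have h' : ∀ x, (d.insert a 1).contains x = true ↔ x ∈ ord ++ [a] := by
        intro x
        rw [PySem.Dict.contains_insert]
        by_cases hx : x = a
        · simp [hx]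
        · simp [hx, h x, beq_eq_false_iff_ne.mpr hx]
      obtain ⟨h1, h2⟩ := ih (d.insert a 1) (ord ++ [a]) h'
      refine ⟨?_, ?_⟩
      · rw [h1, PySem.Set.update_cons, PySem.Set.add_of_not_mem hnmem]
      · intro c
        rw [h2 c, PySem.Dict.getD_insert, List.count_cons]
        by_cases hc : c = a
        · subst hc
          have h0 : d.getD c 0 = 0 := PySem.Dict.getD_of_not_contains d 0 (eq_false_of_ne_true ha)
          simp [h0]; ring
        · have hba : (a == c) = false := beq_eq_false_iff_ne.mpr (fun h'' => hc h''.symm)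
          simp [hc, hba]

-- A's result-building loop, flattened
theorem pvBuild (cnt : Char → Int) (ord : List Char) : ∀ (r : List (List Char)),
    (ord.foldl (fun (r : List (List Char)) c =>
      let r := r ++ [[c]]
      if cnt c > 1 then r ++ [PySem.Int.toChars (cnt c)] else r) r).flatten
    = r.flatten ++ ord.flatMap (fun c => c :: if cnt c > 1 then PySem.Int.toChars (cnt c) else []) := by
  induction ord with
  | nil => simp
  | cons a t ih =>
    intro r
    rw [List.foldl_cons, List.flatMap_cons]
    simp only []
    split_ifs with hc
    · rw [ih]; simp
    · rw [ih]; simp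

-- prepending a fresh element to the set accumulator commutes with Set.update
theorem pvAddPrefix (a : Char) : ∀ (r : List Char) (s : List Char), (∀ x ∈ r, x ≠ a) →
    r.foldl PySem.Set.add (a :: s) = a :: r.foldl PySem.Set.add s := by
  intro r
  induction r with
  | nil => intro s _; simp
  | cons b t ih =>
    intro s h
    have hb : b ≠ a := h b (by simp)
    rw [List.foldl_cons, List.foldl_cons]
    have hadd : PySem.Set.add (a :: s) b = a :: PySem.Set.add s b := by
      simp [PySem.Set.add, PySem.Set.contains, hb]
      split_ifs <;> simp
    rw [hadd, ih _ (fun x hx => h x (by simp [hx]))]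

-- adding elements already in the set is a no-op (so filtering out a set member changes nothing)
theorem pvFoldlAddFilter (a : Char) : ∀ (t : List Char) (s : List Char), a ∈ s →
    t.foldl PySem.Set.add s = (t.filter (fun x => x ≠ a)).foldl PySem.Set.add s := by
  intro t
  induction t with
  | nil => intro s _; simp
  | cons b u ih =>
    intro s hs
    by_cases hb : b = a
    · subst hb
      have : PySem.Set.add s b = s := PySem.Set.add_of_mem hs
      simp [this, ih s hs]
    · have hmem : a ∈ PySem.Set.add s b := by
        simp [PySem.Set.add]; split_ifs <;> simp [hs]
      simp [hb, ih _ hmem]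

-- first-occurrence dedup peels off the head and all its later copies
theorem pvOfListConsFilter (a : Char) (t : List Char) :
    PySem.Set.ofList (a :: t) = a :: PySem.Set.ofList (t.filter (fun x => x ≠ a)) := by
  rw [PySem.Set.ofList_eq_foldl, PySem.Set.ofList_eq_foldl, List.foldl_cons]
  have h0 : PySem.Set.add [] a = [a] := by simp [PySem.Set.add, PySem.Set.contains]
  rw [h0, pvFoldlAddFilter a t [a] (by simp)]
  refine pvAddPrefix a _ [] ?_
  intro x hx
  exact of_decide_eq_true (List.mem_filter.mp hx).2

-- B's recursion computes the per-unique-character flatMap with counts taken from the current list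
theorem pvGoSpecAux : ∀ (n : Nat) (l : List Char), l.length ≤ n →
    pvGo l = (PySem.Set.ofList l).flatMap
      (fun c => c :: if l.count c > 1 then PySem.Int.toChars ((l.count c : Nat) : Int) else []) := by
  intro n
  induction n with
  | zero =>
    intro l h
    have hl : l = [] := List.eq_nil_of_length_eq_zero (Nat.le_zero.mp h)
    subst hl; simp [pvGo]
  | succ m ih =>
    intro l h
    match l with
    | [] => simp [pvGo]
    | a :: t =>
      rw [pvGo]
      have hfa : (a :: t).filter (fun x => x ≠ a) = t.filter (fun x => x ≠ a) := by simp
      have hlen : (t.filter (fun x => x ≠ a)).length ≤ m :=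
        le_trans (List.length_filter_le _ t) (by simp at h; omega)
      rw [hfa, ih _ hlen, pvOfListConsFilter, List.flatMap_cons]
      congr 1
      apply List.flatMap_congr
      intro c hc
      have hcne : c ≠ a := by
        have hm := (PySem.Set.mem_ofList _ _).mp hc
        exact of_decide_eq_true (List.mem_filter.mp hm).2
      have hcount : (t.filter (fun x => x ≠ a)).count c = (a :: t).count c := by
        rw [List.count_cons, List.count_filter (by simp [hcne])]
        simp [beq_eq_false_iff_ne.mpr (fun h' => hcne h'.symm)]
      rw [hcount]

-- ===== VERDICT (by name: the statement is the Claim_ definition above) =====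
theorem insert_repeat_counts_dict_spec : Claim_equal_insert_repeat_counts_dict := by
  intro s _
  unfold Spec_insert_repeat_counts_dict insert_repeat_counts_dict insert_repeat_counts_dict_alt
  by_cases hs : s.toList = []
  · simp [hs]
  · rw [if_neg hs, if_neg hs]
    simp only []
    obtain ⟨h1, h2⟩ := pvAFold s.toList PySem.Dict.empty []
      (by intro x; simp [PySem.Dict.contains_empty])
    rw [pvBuild, pvGoSpecAux s.toList.length s.toList le_rfl]
    rw [h1, PySem.Set.update_nil_left]
    simp only [h2, PySem.Dict.getD_empty, zero_add, List.flatten_nil, List.nil_append]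
    congr 1
    apply List.flatMap_congr
    intro c _
    by_cases hgt : 1 < s.toList.count c
    · rw [if_pos (by exact_mod_cast hgt), if_pos hgt]
    · rw [if_neg (by exact_mod_cast hgt), if_neg hgt]
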